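-- pv_equiv track=rewrite | github.com/rominaoji/english-pos-tagger | src/HMM.py | create_key_value
-- ===== SOURCE A (Python) =====
-- def create_key_value(data):
--     dictionary_word_tag = {}
--     for s in data:
--         for (w, t) in s:
--             w = str(w).lower()
--             try:
--                 try:
--                     dictionary_word_tag[t][w] += 1
--                 except:
--                     dictionary_word_tag[t][w] = 1
--             except:
--                 dictionary_word_tag[t] = {w: 1}
--
--     return dictionary_word_tag
-- ===== SOURCE B (Python) =====
-- def create_key_value(data):
--     # phase 1: flatten/normalize tokens and group each tag's words into one flat list
--     tokens = [(t, str(w).lower()) for s in data for (w, t) in s]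
--     groups = {}
--     for t, w in tokens:
--         groups.setdefault(t, []).append(w)
--     # phase 2: count each tag's word list
--     result = {}
--     for t, ws in groups.items():
--         counts = {}
--         for w in ws:
--             counts[w] = counts.get(w, 0) + 1
--         result[t] = counts
--     return result
-- ===== Notes on version B (the rewrite author's own statement) =====
-- stated objective: alternative
-- what changed: A builds the nested tag->word count dict in one fused loop with nested try/except increments; B works in two phases over a flattened normalized token list: first group each tag's lower-cased words into one flat list per tag, then count each group into the nested result.
import Mathlib
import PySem

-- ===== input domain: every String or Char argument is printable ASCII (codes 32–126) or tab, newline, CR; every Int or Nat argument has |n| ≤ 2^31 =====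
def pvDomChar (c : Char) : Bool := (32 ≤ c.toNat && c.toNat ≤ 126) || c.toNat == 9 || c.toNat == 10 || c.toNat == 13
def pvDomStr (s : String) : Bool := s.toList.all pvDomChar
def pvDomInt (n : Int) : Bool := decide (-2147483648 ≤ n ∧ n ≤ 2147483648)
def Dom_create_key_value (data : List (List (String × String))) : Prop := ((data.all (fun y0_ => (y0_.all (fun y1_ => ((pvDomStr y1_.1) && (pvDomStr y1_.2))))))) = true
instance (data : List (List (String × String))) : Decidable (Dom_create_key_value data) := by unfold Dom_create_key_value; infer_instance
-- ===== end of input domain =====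

-- B replaces A's fused nested try/except increment loop by two phases — flatten/normalize the tokens
-- and group each tag's words in one pass, then count each group — same result, a different decomposition.

-- ===== PORT A =====
def create_key_value (data : List (List (String × String))) : List (String × List (String × Int)) :=
  let d : PySem.Dict String (PySem.Dict String Int) :=
    data.foldl (fun d s =>
      s.foldl (fun d wt =>
        let w := PySem.Str.lower wt.1
        let t := wt.2
        match d.get? t with                                  -- outer try: dictionary_word_tag[t] (KeyError → except)
        | some inner =>
          match inner.get? w with                            -- inner try: [w] += 1 (KeyError → except)
          | some c => d.insert t (inner.insert w (c + 1))
          | none   => d.insert t (inner.insert w 1)          -- inner except: [w] = 1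
        | none => d.insert t (PySem.Dict.empty.insert w 1)   -- outer except: [t] = {w: 1}
        ) d) PySem.Dict.empty
  d.items.map (fun p => (p.1, p.2.items))

-- ===== PORT B =====
-- the counting loop of Source B's phase 2: for w in ws: counts[w] = counts.get(w, 0) + 1
def pvCountWords (ws : List String) : PySem.Dict String Int :=
  ws.foldl (fun c w => c.insert w (c.getD w 0 + 1)) PySem.Dict.empty

def create_key_value_alt (data : List (List (String × String))) : List (String × List (String × Int)) :=
  let tokens := data.flatMap (fun s => s.map (fun wt => (wt.2, PySem.Str.lower wt.1)))
  -- groups.setdefault(t, []).append(w)  =  groups[t] = groups.get(t, []) + [w]  =  Dict.modify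
  let groups : PySem.Dict String (List String) :=
    tokens.foldl (fun g p => g.modify p.1 [] (fun l => l ++ [p.2])) PySem.Dict.empty
  let result : PySem.Dict String (PySem.Dict String Int) :=
    groups.items.foldl (fun r p => r.insert p.1 (pvCountWords p.2)) PySem.Dict.empty
  result.items.map (fun p => (p.1, p.2.items))

-- ===== PRECONDITION & SPEC =====
def Spec_create_key_value (data : List (List (String × String))) (out : List (String × List (String × Int))) : Prop := out = create_key_value_alt data
instance (data : List (List (String × String))) (out : List (String × List (String × Int))) : Decidable (Spec_create_key_value data out) := by unfold Spec_create_key_value; infer_instance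

-- ===== CLAIM (what is proved, stated in full; the proofs are below) =====
def Claim_equal_create_key_value : Prop := ∀ (data : List (List (String × String))), Dom_create_key_value data → Spec_create_key_value data (create_key_value data)

-- ===== LEMMAS AND PROOFS =====

-- one token step of A, written uniformly over a (tag, lower-cased word) pair
def pvNStep (d : PySem.Dict String (PySem.Dict String Int)) (p : String × String) :
    PySem.Dict String (PySem.Dict String Int) :=
  let inner := d.getD p.1 PySem.Dict.empty
  d.insert p.1 (inner.insert p.2 (inner.getD p.2 0 + 1))

theorem pvNStep_def (d : PySem.Dict String (PySem.Dict String Int)) (p : String × String) :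
    pvNStep d p
      = d.insert p.1 ((d.getD p.1 PySem.Dict.empty).insert p.2
          ((d.getD p.1 PySem.Dict.empty).getD p.2 0 + 1)) := rfl

theorem astep_eq_nstep (d : PySem.Dict String (PySem.Dict String Int)) (wt : String × String) :
    (match d.get? wt.2 with
     | some inner =>
       match inner.get? (PySem.Str.lower wt.1) with
       | some c => d.insert wt.2 (inner.insert (PySem.Str.lower wt.1) (c + 1))
       | none   => d.insert wt.2 (inner.insert (PySem.Str.lower wt.1) 1)
     | none => d.insert wt.2 (PySem.Dict.empty.insert (PySem.Str.lower wt.1) 1))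
    = pvNStep d (wt.2, PySem.Str.lower wt.1) := by
  rw [pvNStep_def]
  rcases ht : d.get? wt.2 with _ | inner
  · rw [PySem.Dict.getD_of_get?_eq_none d _ ht]
    simp [PySem.Dict.getD_empty]
  · rcases hw : inner.get? (PySem.Str.lower wt.1) with _ | c
    · rw [PySem.Dict.getD_of_get?_eq_some d _ ht, PySem.Dict.getD_of_get?_eq_none inner _ hw]
      simp [hw]
    · rw [PySem.Dict.getD_of_get?_eq_some d _ ht, PySem.Dict.getD_of_get?_eq_some inner _ hw]
      simp [hw]

-- the word-count loop of B is a Counter of the word list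
theorem countWords_eq_counter (ws : List String) :
    pvCountWords ws = PySem.Dict.counter ws := by
  unfold pvCountWords
  rw [← PySem.Dict.foldl_insert_getD_add_one_eq_counter]

-- a dict with distinct keys is its key list paired with its lookups
theorem items_eq_map_keys {ν : Type} (d : PySem.Dict String ν) (h : d.keys.Nodup) (d0 : ν) :
    d.items = d.keys.map (fun k => (k, d.getD k d0)) := by
  simp only [PySem.Dict.keys, List.map_map, Function.comp_def]
  conv_lhs => rw [← List.map_id d.items]
  refine List.map_congr_left fun p hp => ?_
  have h2 : d.getD p.1 d0 = p.2 := PySem.Dict.getD_of_mem_items d (by exact hp) h d0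
  simp [h2]

-- core invariant: folding pvNStep over the (tag, word) token list produces, as an items list,
-- one entry per tag (in first-occurrence order) carrying the Counter of that tag's words
theorem nest_items (ps : List (String × String)) :
    (ps.foldl pvNStep PySem.Dict.empty).items
      = (PySem.List.dedup (ps.map (fun p => p.1))).map
          (fun t => (t, PySem.Dict.counter ((ps.filter (fun p => p.1 == t)).map (fun p => p.2)))) := by
  induction ps using List.reverseRecOn with
  | nil => rfl
  | append_singleton ps p IH =>
    rcases p with ⟨t, w⟩
    have hkeys : (ps.foldl pvNStep PySem.Dict.empty).keys
        = PySem.List.dedup (ps.map (fun p => p.1)) := by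
      simp only [PySem.Dict.keys, IH, List.map_map, Function.comp_def, List.map_id']
    have hnodup : (ps.foldl pvNStep PySem.Dict.empty).keys.Nodup := by
      rw [hkeys]; exact PySem.List.nodup_dedup _
    have hfilter : ∀ t' : String,
        ((ps ++ [(t, w)]).filter (fun p => p.1 == t')).map (fun p => p.2)
          = (ps.filter (fun p => p.1 == t')).map (fun p => p.2) ++ if t = t' then [w] else [] := by
      intro t'
      rw [List.filter_append]
      by_cases h : t = t' <;> simp [h]
    have htags : PySem.List.dedup ((ps ++ [(t, w)]).map (fun p => p.1))
        = PySem.Set.add (PySem.List.dedup (ps.map (fun p => p.1))) t := by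
      simp [PySem.List.dedup_eq_ofList, PySem.Set.ofList_append_singleton]
    rw [List.foldl_append, List.foldl_cons, List.foldl_nil, pvNStep_def]
    by_cases htin : t ∈ PySem.List.dedup (ps.map (fun p => p.1))
    · -- the tag already has an entry: its counter is bumped in place
      have hmem : (t, PySem.Dict.counter ((ps.filter (fun p => p.1 == t)).map (fun p => p.2)))
          ∈ (ps.foldl pvNStep PySem.Dict.empty).items := by
        rw [IH]; exact List.mem_map_of_mem htin
      have hinner : (ps.foldl pvNStep PySem.Dict.empty).getD t PySem.Dict.empty
          = PySem.Dict.counter ((ps.filter (fun p => p.1 == t)).map (fun p => p.2)) :=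
        PySem.Dict.getD_of_mem_items _ hmem hnodup _
      have hcont : (ps.foldl pvNStep PySem.Dict.empty).contains t = true := by
        rw [PySem.Dict.contains_iff_mem_keys, hkeys]; exact htin
      rw [PySem.Dict.items_insert_of_contains _ _ hcont, IH, htags,
        PySem.Set.add_of_mem htin, List.map_map]
      refine List.map_congr_left ?_
      intro t' ht'
      simp only [Function.comp_def]
      by_cases h : t' = t
      · subst h
        rw [hinner]
        simp only [beq_self_eq_true, if_pos, hfilter t',
          PySem.Dict.counter_append_singleton]
        rfl
      · have hne : ¬ t = t' := fun hh => h hh.symm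
        rw [hfilter t', if_neg hne, List.append_nil]
        simp [h]
    · -- a fresh tag: a singleton counter is appended
      have hcont : (ps.foldl pvNStep PySem.Dict.empty).contains t = false := by
        rw [← Bool.not_eq_true, PySem.Dict.contains_iff_mem_keys, hkeys]; exact htin
      have hget : (ps.foldl pvNStep PySem.Dict.empty).get? t = none := by
        rw [PySem.Dict.get?_eq_none_iff_not_mem_keys, hkeys]; exact htin
      have hinner : (ps.foldl pvNStep PySem.Dict.empty).getD t PySem.Dict.empty
          = PySem.Dict.empty :=
        PySem.Dict.getD_of_get?_eq_none _ _ hget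
      have hnot : t ∉ ps.map (fun p => p.1) := by
        intro hc
        exact htin (by rwa [PySem.List.dedup_eq_ofList, PySem.Set.mem_ofList])
      have hfilt0 : ps.filter (fun p => p.1 == t) = [] := by
        rw [List.filter_eq_nil_iff]
        intro p hp hbeq
        exact hnot (by rw [List.mem_map]; exact ⟨p, hp, eq_of_beq hbeq⟩)
      rw [PySem.Dict.items_insert_of_not_contains _ _ hcont, IH, htags,
        PySem.Set.add_of_not_mem htin, List.map_append]
      congr 1
      · refine List.map_congr_left ?_
        intro t' ht'
        have hne : ¬ t = t' := fun hh => htin (hh ▸ ht')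
        rw [hfilter t', if_neg hne, List.append_nil]
      · rw [hinner]
        simp only [List.map_cons, List.map_nil, hfilter t, hfilt0,
          List.map_nil, List.nil_append]
        rfl

theorem create_key_value_eq (data : List (List (String × String))) :
    create_key_value data = create_key_value_alt data := by
  unfold create_key_value create_key_value_alt
  have hstep : ∀ (d : PySem.Dict String (PySem.Dict String Int)) (wt : String × String),
      (fun d (wt : String × String) =>
        let w := PySem.Str.lower wt.1
        let t := wt.2
        match d.get? t with
        | some inner =>
          match inner.get? w with
          | some c => d.insert t (inner.insert w (c + 1))
          | none   => d.insert t (inner.insert w 1)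
        | none => d.insert t (PySem.Dict.empty.insert w 1)) d wt
        = pvNStep d (wt.2, PySem.Str.lower wt.1) := fun d wt => astep_eq_nstep d wt
  simp only [hstep]
  have hA : data.foldl (fun d s => s.foldl (fun d wt => pvNStep d (wt.2, PySem.Str.lower wt.1)) d)
        PySem.Dict.empty
      = (data.flatMap (fun s => s.map (fun wt => (wt.2, PySem.Str.lower wt.1)))).foldl pvNStep
        PySem.Dict.empty := by
    simp [List.flatMap_def, List.foldl_flatten, List.foldl_map]
  rw [hA]
  set tokens := data.flatMap (fun s => s.map (fun wt => (wt.2, PySem.Str.lower wt.1))) with htok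
  set groups := tokens.foldl (fun g p => g.modify p.1 [] (fun l => l ++ [p.2])) PySem.Dict.empty
    with hgroups
  have hgkeys : groups.keys = PySem.List.dedup (tokens.map (fun p => p.1)) := by
    rw [hgroups, PySem.Dict.keys_foldl_modify_key]
    simp [PySem.Dict.keys_empty, PySem.Set.update_nil_left, PySem.List.dedup_eq_ofList]
  have hgnodup : groups.keys.Nodup := by
    rw [hgkeys]; exact PySem.List.nodup_dedup _
  have hgval : ∀ t : String,
      groups.getD t [] = (tokens.filter (fun p => p.1 == t)).map (fun p => p.2) := by
    intro t
    rw [hgroups, PySem.Dict.getD_foldl_modify_append, PySem.Dict.getD_empty, List.nil_append]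
  have hB : (groups.items.foldl (fun r p => r.insert p.1 (pvCountWords p.2))
        PySem.Dict.empty).items
      = groups.items.map (fun p => (p.1, pvCountWords p.2)) := by
    rw [PySem.Dict.items_foldl_insert_fresh groups.items (fun p => p.1)
      (fun p => pvCountWords p.2) PySem.Dict.empty
      (fun a _ => PySem.Dict.contains_empty a.1) (by exact hgnodup)]
    rfl
  rw [hB, items_eq_map_keys groups hgnodup [], nest_items tokens, hgkeys]
  simp only [List.map_map]
  refine List.map_congr_left ?_
  intro t _
  simp only [Function.comp_def, hgval t, countWords_eq_counter]

-- ===== VERDICT (by name: the statement is the Claim_ definition above) =====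
theorem create_key_value_spec : Claim_equal_create_key_value := by
  intro data _
  unfold Spec_create_key_value
  exact create_key_value_eq data
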